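-- pv_equiv track=rewrite | github.com/Muuuchen/forge | torchforge/front/base_modify.py | add_gdc_launch_dependents_to_epilogue
-- ===== SOURCE A (Python) =====
-- def add_gdc_launch_dependents_to_epilogue(kernel_code):
--     """在epilogue部分（tl.store之前）添加gdc_launch_dependents()"""
--     lines = kernel_code.split('\n')
--
--     # 找到最后一个tl.store的位置
--     last_store_idx = -1
--     for i in range(len(lines) - 1, -1, -1):
--         if 'tl.store(' in lines[i]:
--             last_store_idx = i
--             break
--
--     if last_store_idx == -1:
--         return kernel_code
--
--     # 在最后一个tl.store之前添加gdc_launch_dependents()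
--     indent = get_line_indent(lines[last_store_idx])
--     gdc_launch_line = f"{indent}gdc_launch_dependents()"
--     lines.insert(last_store_idx, gdc_launch_line)
--
--     return '\n'.join(lines)
--
-- def get_line_indent(line):
--     """获取行的缩进"""
--     return line[:len(line) - len(line.lstrip())]
-- ===== SOURCE B (Python) =====
-- def add_gdc_launch_dependents_to_epilogue(kernel_code):
--     """One backward pass over the lines, building the output back-to-front."""
--     out_rev = []
--     inserted = False
--     for line in reversed(kernel_code.split('\n')):
--         out_rev.append(line)
--         if not inserted and 'tl.store(' in line:
--             i = 0
--             while i < len(line) and line[i].isspace():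
--                 i += 1
--             out_rev.append(line[:i] + 'gdc_launch_dependents()')
--             inserted = True
--     if not inserted:
--         return kernel_code
--     return '\n'.join(reversed(out_rev))
-- ===== Notes on version B (the rewrite author's own statement) =====
-- stated objective: alternative
-- what changed: Replaces A's backward index loop plus list.insert and lstrip-based slicing with a single pass over the reversed lines that builds the output back-to-front with an inserted-flag accumulator and a takewhile-style indent scan.
import Mathlib
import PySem

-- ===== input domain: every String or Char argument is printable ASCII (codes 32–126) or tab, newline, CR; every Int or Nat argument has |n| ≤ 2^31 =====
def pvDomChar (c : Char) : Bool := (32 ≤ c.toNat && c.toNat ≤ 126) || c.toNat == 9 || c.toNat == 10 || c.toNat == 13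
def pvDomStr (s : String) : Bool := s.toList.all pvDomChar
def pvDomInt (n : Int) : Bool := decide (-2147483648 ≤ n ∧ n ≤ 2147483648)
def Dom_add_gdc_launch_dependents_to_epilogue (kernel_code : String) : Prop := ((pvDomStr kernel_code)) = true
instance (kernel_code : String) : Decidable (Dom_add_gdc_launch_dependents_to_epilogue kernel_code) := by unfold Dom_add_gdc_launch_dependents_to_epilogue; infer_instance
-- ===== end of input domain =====

-- B replaces A's backward index scan + list.insert with a single backward pass that
-- builds the output lines back-to-front (alternative decomposition, same cost).

-- ===== PORT A =====
-- get_line_indent: line[:len(line) - len(line.lstrip())]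
def pvGetLineIndent (line : String) : String :=
  String.ofList (PySem.Chars.slice line.toList none
    (some ((line.toList.length : Int) - ((PySem.Chars.lstrip line.toList).length : Int))))

-- the backward 'for i in range(len(lines)-1,-1,-1): if … : last = i; break' loop
def pvFindLastStore (idxs : List Int) (lines : List String) : Int :=
  match idxs with
  | [] => -1
  | i :: rest =>
    if PySem.Str.isIn "tl.store(" ((PySem.List.pyGet? lines i).getD "") then i
    else pvFindLastStore rest lines

def add_gdc_launch_dependents_to_epilogue (kernel_code : String) : String :=
  let lines := (PySem.Str.split? kernel_code "\n").getD []
  let last_store_idx :=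
    pvFindLastStore (PySem.List.pyRange ((lines.length : Int) - 1) (-1) (-1)) lines
  if last_store_idx = -1 then kernel_code
  else
    let indent := pvGetLineIndent ((PySem.List.pyGet? lines last_store_idx).getD "")
    let gdc_launch_line := indent ++ "gdc_launch_dependents()"
    PySem.Str.join "\n" (PySem.List.insert lines last_store_idx gdc_launch_line)

-- ===== PORT B =====
-- the 'while i < len(line) and line[i].isspace(): i += 1; line[:i]' indent scan
def pvBIndent : List Char → List Char
  | [] => []
  | c :: cs => if PySem.Chars.isspace c then c :: pvBIndent cs else []

-- one iteration of B's loop body over a line (state: output-so-far in reverse, inserted flag)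
def pvBStep (st : List String × Bool) (line : String) : List String × Bool :=
  let out := st.1 ++ [line]
  if !st.2 && PySem.Str.isIn "tl.store(" line then
    (out ++ [String.ofList (pvBIndent line.toList) ++ "gdc_launch_dependents()"], true)
  else (out, st.2)

def add_gdc_launch_dependents_to_epilogue_alt (kernel_code : String) : String :=
  let st := (((PySem.Str.split? kernel_code "\n").getD []).reverse).foldl pvBStep ([], false)
  if st.2 = false then kernel_code
  else PySem.Str.join "\n" st.1.reverse

-- ===== PRECONDITION & SPEC =====
def Spec_add_gdc_launch_dependents_to_epilogue (kernel_code : String) (out : String) : Prop := out = add_gdc_launch_dependents_to_epilogue_alt kernel_code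
instance (kernel_code : String) (out : String) : Decidable (Spec_add_gdc_launch_dependents_to_epilogue kernel_code out) := by unfold Spec_add_gdc_launch_dependents_to_epilogue; infer_instance

-- ===== CLAIM (what is proved, stated in full; the proofs are below) =====
def Claim_equal_add_gdc_launch_dependents_to_epilogue : Prop := ∀ (kernel_code : String), Dom_add_gdc_launch_dependents_to_epilogue kernel_code → Spec_add_gdc_launch_dependents_to_epilogue kernel_code (add_gdc_launch_dependents_to_epilogue kernel_code)

-- ===== LEMMAS AND PROOFS =====

-- shorthand for 'tl.store(' membership and B's inserted line
def pvP (line : String) : Bool := PySem.Str.isIn "tl.store(" line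
def pvGdc (line : String) : String :=
  String.ofList (pvBIndent line.toList) ++ "gdc_launch_dependents()"

-- B's indent scan is takeWhile isspace
theorem pvBIndent_eq_takeWhile (cs : List Char) :
    pvBIndent cs = cs.takeWhile PySem.Chars.isspace := by
  induction cs with
  | nil => rfl
  | cons c cs ih => simp [pvBIndent, List.takeWhile_cons, ih]

-- A's indent slice and B's indent scan agree
theorem pvIndent_eq (line : String) :
    pvGetLineIndent line = String.ofList (pvBIndent line.toList) := by
  unfold pvGetLineIndent
  rw [pvBIndent_eq_takeWhile]
  congr 1
  have hL : PySem.Chars.lstrip line.toList = line.toList.dropWhile PySem.Chars.isspace := rfl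
  rw [hL]
  set cs := line.toList with hcs
  have hlen : (cs.takeWhile PySem.Chars.isspace).length + (cs.dropWhile PySem.Chars.isspace).length = cs.length := by
    conv_rhs => rw [← List.takeWhile_append_dropWhile (p := PySem.Chars.isspace) (l := cs)]
    rw [List.length_append]
  have h1 : ((cs.length : Int) - ((cs.dropWhile PySem.Chars.isspace).length : Int)) = (((cs.takeWhile PySem.Chars.isspace).length : Nat) : Int) := by omega
  rw [h1, PySem.Chars.slice_eq_listSlice, PySem.List.slice_to_natCast]
  exact (List.prefix_iff_eq_take.mp (List.takeWhile_prefix _)).symm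

-- A's loop over indices that all lie inside a prefix ignores the appended tail
theorem pvFindLastStore_append (idxs : List Int) (xs ys : List String)
    (h : ∀ i ∈ idxs, 0 ≤ i ∧ i < (xs.length : Int)) :
    pvFindLastStore idxs (xs ++ ys) = pvFindLastStore idxs xs := by
  induction idxs with
  | nil => rfl
  | cons i rest ih =>
    obtain ⟨h0, h1⟩ := h i (by simp)
    have hi : i.toNat < xs.length := by omega
    have hget : PySem.List.pyGet? (xs ++ ys) i = PySem.List.pyGet? xs i := by
      rw [PySem.List.pyGet?_of_nonneg _ h0, PySem.List.pyGet?_of_nonneg _ h0]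
      exact List.getElem?_append_left hi
    simp only [pvFindLastStore, hget]
    rw [ih (fun j hj => h j (by simp [hj]))]

-- A's loop returns -1 when no line matches
theorem pvFindLastStore_none (idxs : List Int) (lines : List String)
    (h : ∀ l ∈ lines, pvP l = false) :
    pvFindLastStore idxs lines = -1 := by
  induction idxs with
  | nil => rfl
  | cons i rest ih =>
    have hfalse : PySem.Str.isIn "tl.store(" ((PySem.List.pyGet? lines i).getD "") = false := by
      cases hg : PySem.List.pyGet? lines i with
      | none => simp only [Option.getD_none]; decide
      | some v =>
        simpa [Option.getD_some, pvP] using h v (PySem.List.mem_of_pyGet?_eq_some _ hg)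
    simp only [pvFindLastStore, hfalse]
    simpa using ih

-- A's loop finds the last matching line
theorem pvFindLastStore_last (S P : List String) (m : String)
    (hm : pvP m = true) (hP : ∀ l ∈ P, pvP l = false) :
    pvFindLastStore
      (PySem.List.pyRange (((S ++ m :: P).length : Int) - 1) (-1) (-1)) (S ++ m :: P)
      = (S.length : Int) := by
  induction P using List.reverseRecOn with
  | nil =>
    have hlen : ((S ++ [m]).length : Int) - 1 = (S.length : Int) := by simp
    rw [hlen, PySem.List.pyRange_neg_one_cons (by omega)]
    have hget : PySem.List.pyGet? (S ++ [m]) (S.length : Int) = some m :=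
      PySem.List.pyGet?_append_length S [] m
    simp only [pvFindLastStore, hget, Option.getD_some]
    rw [if_pos (by simpa [pvP] using hm)]
  | append_singleton P q ih =>
    have hq : pvP q = false := hP q (by simp)
    have hlines : S ++ m :: (P ++ [q]) = (S ++ m :: P) ++ [q] := by simp
    rw [hlines]
    have hlen : (((S ++ m :: P) ++ [q]).length : Int) - 1 = (((S ++ m :: P).length : Nat) : Int) := by
      simp; omega
    rw [hlen, PySem.List.pyRange_neg_one_cons (by omega)]
    have hget : PySem.List.pyGet? ((S ++ m :: P) ++ [q]) (((S ++ m :: P).length : Nat) : Int) = some q := by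
      have := PySem.List.pyGet?_append_length (S ++ m :: P) [] q
      simpa using this
    simp only [pvFindLastStore, hget, Option.getD_some]
    rw [if_neg (by simpa [pvP] using hq)]
    rw [show ((((S ++ m :: P).length : Nat) : Int) - 1) = (((S ++ m :: P).length : Int) - 1) by ring]
    rw [pvFindLastStore_append _ _ _ (fun i hi => by
      have h2 := PySem.List.mem_pyRange_neg_one.mp hi
      have h3 : (0 : Int) < ((S ++ m :: P).length : Int) := by simp; omega
      constructor <;> omega)]
    exact ih (fun l hl => hP l (by simp [hl]))

-- B's fold once the flag is set just copies
theorem pvFold_true (rev acc : List String) :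
    rev.foldl pvBStep (acc, true) = (acc ++ rev, true) := by
  induction rev generalizing acc with
  | nil => simp
  | cons l rest ih => simp [pvBStep, ih]

-- B's fold when nothing matches
theorem pvFold_none (rev acc : List String) (h : ∀ l ∈ rev, pvP l = false) :
    rev.foldl pvBStep (acc, false) = (acc ++ rev, false) := by
  induction rev generalizing acc with
  | nil => simp
  | cons l rest ih =>
    have hl : PySem.Str.isIn "tl.store(" l = false := by simpa [pvP] using h l (by simp)
    simp only [List.foldl_cons, pvBStep, hl]
    simpa using ih (acc ++ [l]) (fun x hx => h x (by simp [hx]))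

-- B's fold on pre ++ m :: suf with pre all failing and m matching
theorem pvFold_found (pre suf acc : List String) (m : String)
    (hpre : ∀ l ∈ pre, pvP l = false) (hm : pvP m = true) :
    (pre ++ m :: suf).foldl pvBStep (acc, false)
      = (acc ++ pre ++ m :: pvGdc m :: suf, true) := by
  induction pre generalizing acc with
  | nil =>
    have hm' : PySem.Str.isIn "tl.store(" m = true := by simpa [pvP] using hm
    simp only [List.nil_append, List.foldl_cons, pvBStep, hm']
    simp [pvFold_true, pvGdc]
  | cons l pre ih =>
    have hl : PySem.Str.isIn "tl.store(" l = false := by simpa [pvP] using hpre l (by simp)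
    simp only [List.cons_append, List.foldl_cons, pvBStep, hl]
    simpa using ih (acc ++ [l]) (fun x hx => hpre x (by simp [hx]))

-- every list splits at its first match, or has none
theorem pvDecomp (rev : List String) :
    (∀ l ∈ rev, pvP l = false) ∨
    ∃ pre m suf, rev = pre ++ m :: suf ∧ (∀ l ∈ pre, pvP l = false) ∧ pvP m = true := by
  induction rev with
  | nil => exact Or.inl (by simp)
  | cons l rest ih =>
    by_cases hl : pvP l = true
    · exact Or.inr ⟨[], l, rest, by simp, by simp, hl⟩
    · have hl' : pvP l = false := by
        cases hpl : pvP l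
        · rfl
        · exact absurd hpl hl
      rcases ih with h | ⟨pre, m, suf, hdec, hpre, hm⟩
      · refine Or.inl ?_
        intro x hx
        rcases List.mem_cons.mp hx with rfl | hx
        · exact hl'
        · exact h x hx
      · refine Or.inr ⟨l :: pre, m, suf, by rw [hdec]; rfl, ?_, hm⟩
        intro x hx
        rcases List.mem_cons.mp hx with rfl | hx
        · exact hl'
        · exact hpre x hx

-- the whole equivalence, stated over the split line list
theorem pvCore (lines : List String) (code : String) :
    (if pvFindLastStore (PySem.List.pyRange ((lines.length : Int) - 1) (-1) (-1)) lines = -1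
     then code
     else PySem.Str.join "\n" (PySem.List.insert lines
       (pvFindLastStore (PySem.List.pyRange ((lines.length : Int) - 1) (-1) (-1)) lines)
       (pvGetLineIndent ((PySem.List.pyGet? lines
         (pvFindLastStore (PySem.List.pyRange ((lines.length : Int) - 1) (-1) (-1)) lines)).getD "")
        ++ "gdc_launch_dependents()")))
    = (if (lines.reverse.foldl pvBStep ([], false)).2 = false then code
       else PySem.Str.join "\n" (lines.reverse.foldl pvBStep ([], false)).1.reverse) := by
  rcases pvDecomp lines.reverse with hnone | ⟨pre, m, suf, hdec, hpre, hm⟩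
  · have hAll : ∀ l ∈ lines, pvP l = false := fun l hl => hnone l (by simpa using hl)
    rw [pvFindLastStore_none _ _ hAll, pvFold_none _ _ hnone]
    simp
  · have hlines' : lines = suf.reverse ++ m :: pre.reverse := by
      have := congrArg List.reverse hdec
      simpa using this
    have hPrev : ∀ l ∈ pre.reverse, pvP l = false := fun l hl => hpre l (by simpa using hl)
    have hfind : pvFindLastStore
        (PySem.List.pyRange ((lines.length : Int) - 1) (-1) (-1)) lines
        = ((suf.reverse.length : Nat) : Int) := by
      conv_lhs => rw [hlines']
      exact pvFindLastStore_last _ _ _ hm hPrev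
    rw [hfind, hdec, pvFold_found _ _ _ _ hpre hm]
    rw [if_neg (by omega)]
    have hget : PySem.List.pyGet? lines ((suf.reverse.length : Nat) : Int) = some m := by
      rw [hlines']
      exact PySem.List.pyGet?_append_length suf.reverse pre.reverse m
    have hins : PySem.List.insert lines ((suf.reverse.length : Nat) : Int)
        (pvGetLineIndent ((PySem.List.pyGet? lines ((suf.reverse.length : Nat) : Int)).getD "")
          ++ "gdc_launch_dependents()")
        = suf.reverse ++ (pvGdc m :: m :: pre.reverse) := by
      rw [PySem.List.insert_natCast _ _ _ (by rw [hlines']; simp)]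
      rw [hget, Option.getD_some, pvIndent_eq]
      conv_lhs => rw [hlines']
      rw [List.take_left, List.drop_left]
      rfl
    rw [hins]
    rw [if_neg (by simp)]
    congr 1
    simp

-- ===== VERDICT (by name: the statement is the Claim_ definition above) =====
theorem add_gdc_launch_dependents_to_epilogue_spec : Claim_equal_add_gdc_launch_dependents_to_epilogue := by
  intro kernel_code _
  show add_gdc_launch_dependents_to_epilogue kernel_code
      = add_gdc_launch_dependents_to_epilogue_alt kernel_code
  exact pvCore ((PySem.Str.split? kernel_code "\n").getD []) kernel_code
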